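-- pv_equiv track=rewrite | github.com/kairobuildz/tickrodevs | TickbotRoDevs/commands/tickets/create.py | sanitize_channel_name
-- ===== SOURCE A (Python) =====
-- def sanitize_channel_name(name: str) -> str:
--     cleaned_chars = []
--     for ch in name.lower():
--         if ch.isalnum():
--             cleaned_chars.append(ch)
--         elif ch in {"-", "_"} or ch.isspace():
--             cleaned_chars.append("-")
--     # Collapse consecutive dashes
--     safe = []
--     for ch in cleaned_chars:
--         if ch == "-" and safe and safe[-1] == "-":
--             continue
--         safe.append(ch)
--     result = "".join(safe).strip("-")
--     return result[:90] or "ticket"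
-- ===== SOURCE B (Python) =====
-- def sanitize_channel_name(name: str) -> str:
--     mapped = "".join(
--         ch if ch.isalnum() else "-" if (ch in "-_" or ch.isspace()) else ""
--         for ch in name.lower()
--     )
--     result = "-".join(token for token in mapped.split("-") if token)
--     return result[:90] or "ticket"
-- ===== Notes on version B (the rewrite author's own statement) =====
-- stated objective: idiomatic
-- what changed: A's stateful collapse-consecutive-dashes loop followed by the two-sided dash strip is replaced by the slug idiom: split the mapped string on the dash character, discard empty tokens, and rejoin with a dash.
import Mathlib
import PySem

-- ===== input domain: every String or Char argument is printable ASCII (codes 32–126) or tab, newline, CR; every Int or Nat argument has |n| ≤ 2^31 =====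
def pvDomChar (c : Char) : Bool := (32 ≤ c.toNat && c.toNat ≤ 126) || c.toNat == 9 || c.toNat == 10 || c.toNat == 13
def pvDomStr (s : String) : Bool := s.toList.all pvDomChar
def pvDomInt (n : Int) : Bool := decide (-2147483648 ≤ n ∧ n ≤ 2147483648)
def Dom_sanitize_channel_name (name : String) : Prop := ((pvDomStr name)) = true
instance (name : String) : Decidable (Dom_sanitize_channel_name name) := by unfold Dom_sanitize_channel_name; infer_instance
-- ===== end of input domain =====

-- B replaces A's stateful collapse-consecutive-dashes loop followed by the two-sided dash strip
-- with the slug idiom: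
-- split the mapped string on dashes, drop empty tokens, rejoin with a dash (objective: idiomatic).

-- ===== PORT A =====
def sanitize_channel_name (name : String) : String :=
  let cleaned : List Char := (PySem.Chars.lower name.toList).foldl
    (fun acc ch =>
      if PySem.Chars.isalnum ch then acc ++ [ch]
      else if ch = '-' ∨ ch = '_' ∨ PySem.Chars.isspace ch then acc ++ ['-']
      else acc) []
  let safe : List Char := cleaned.foldl
    (fun safe ch =>
      if ch = '-' ∧ safe ≠ [] ∧ safe.getLast? = some '-' then safe
      else safe ++ [ch]) []
  let result := PySem.Chars.stripChars safe ['-']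
  let r := PySem.List.slice result none (some 90)
  if r = [] then "ticket" else String.ofList r

-- ===== PORT B =====
def sanitize_channel_name_alt (name : String) : String :=
  let mapped : List Char := (PySem.Chars.lower name.toList).flatMap
    (fun ch =>
      if PySem.Chars.isalnum ch then [ch]
      else if ch = '-' ∨ ch = '_' ∨ PySem.Chars.isspace ch then ['-']
      else [])
  let result := PySem.Chars.join ['-'] ((List.splitOn '-' mapped).filter (fun t => t ≠ []))
  let r := PySem.List.slice result none (some 90)
  if r = [] then "ticket" else String.ofList r

-- ===== PRECONDITION & SPEC =====
def Spec_sanitize_channel_name (name : String) (out : String) : Prop := out = sanitize_channel_name_alt name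
instance (name : String) (out : String) : Decidable (Spec_sanitize_channel_name name out) := by unfold Spec_sanitize_channel_name; infer_instance

-- ===== CLAIM (what is proved, stated in full; the proofs are below) =====
def Claim_equal_sanitize_channel_name : Prop := ∀ (name : String), Dom_sanitize_channel_name name → Spec_sanitize_channel_name name (sanitize_channel_name name)

-- ===== LEMMAS AND PROOFS =====
def pvD (c : Char) : Bool := c == '-'
def pvND (c : Char) : Bool := c != '-'
def pvRstrip (s : List Char) : List Char := (List.dropWhile pvD s.reverse).reverse

theorem pv_stripChars_eq (s : List Char) :
    PySem.Chars.stripChars s ['-'] = pvRstrip (s.dropWhile pvD) := by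
  have hp : (fun c => List.contains ['-'] c) = pvD := by
    funext c; simp [pvD]; cases h : c == '-' <;> simp_all
  simp only [PySem.Chars.stripChars, hp, pvRstrip]

def pvGo (p : Bool) : List Char → List Char
  | [] => []
  | c :: cs => if c = '-' ∧ p then pvGo true cs else c :: pvGo (c == '-') cs

def pvTok : List Char → List (List Char)
  | [] => []
  | c :: cs =>
      if c = '-' then pvTok cs
      else (c :: cs.takeWhile pvND) :: pvTok (cs.dropWhile pvND)
  termination_by cs => cs.length
  decreasing_by
    · simp
    · simpa using Nat.lt_succ_of_le (cs.length_dropWhile_le pvND)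

theorem pv_go_true (cs : List Char) : pvGo true cs = pvGo false (cs.dropWhile pvD) := by
  induction cs with
  | nil => simp [pvGo]
  | cons c cs ih =>
    by_cases h : c = '-'
    · subst h
      rw [pvGo, if_pos ⟨rfl, rfl⟩, List.dropWhile_cons, if_pos (by simp [pvD])]
      exact ih
    · rw [pvGo, if_neg (by simp [h]), List.dropWhile_cons, if_neg (by simp [pvD, h]),
        pvGo, if_neg (by simp [h])]

theorem pv_head_dropWhile (cs : List Char) (d : Char)
    (hd : (cs.dropWhile pvD).head? = some d) : pvD d = false := by
  have hne := List.head_dropWhile_not (p := pvD) (l := cs)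
  rcases he : cs.dropWhile pvD with _ | ⟨e, r⟩
  · rw [he] at hd; simp at hd
  · rw [he] at hd
    simp only [List.head?_cons, Option.some.injEq] at hd
    have h2 := hne (by rw [he]; simp)
    simp only [he, List.head_cons] at h2
    rw [hd] at h2
    exact h2

theorem pv_go_nondash_head (t : List Char) (h : ∀ d, t.head? = some d → pvD d = false) :
    List.dropWhile pvD (pvGo false t) = pvGo false t := by
  cases t with
  | nil => simp [pvGo]
  | cons c cs =>
    have hc : pvD c = false := h c rfl
    rw [pvGo, if_neg (by simp), List.dropWhile_cons, if_neg (by simp [hc])]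

theorem pv_lstrip_go (cs : List Char) :
    List.dropWhile pvD (pvGo false cs) = pvGo false (cs.dropWhile pvD) := by
  cases cs with
  | nil => simp [pvGo]
  | cons c cs =>
    by_cases h : c = '-'
    · subst h
      rw [pvGo, if_neg (by simp), List.dropWhile_cons, if_pos (by simp [pvD]),
        List.dropWhile_cons, if_pos (by simp [pvD]),
        show ('-' == '-') = true from rfl, pv_go_true]
      exact pv_go_nondash_head _ (pv_head_dropWhile cs)
    · rw [pvGo, if_neg (by simp [h]), List.dropWhile_cons, if_neg (by simp [pvD, h]),
        List.dropWhile_cons, if_neg (by simp [pvD, h]), pvGo, if_neg (by simp [h])]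

theorem pv_dropWhile_of_all {l : List Char} (h : ∀ x ∈ l, pvD x = false) :
    l.dropWhile pvD = l := by
  cases l with
  | nil => rfl
  | cons a l => rw [List.dropWhile_cons, if_neg (by simp [h a (by simp)])]

theorem pv_rstrip_of_all {l : List Char} (h : ∀ x ∈ l, pvD x = false) :
    pvRstrip l = l := by
  rw [pvRstrip, pv_dropWhile_of_all (by intro x hx; exact h x (by simpa using hx)),
    List.reverse_reverse]

theorem pv_rstrip_append_dash (x : List Char) : pvRstrip (x ++ ['-']) = pvRstrip x := by
  simp [pvRstrip, pvD]

theorem pv_rstrip_append (x y : List Char) (a : Char) (ha : a ∈ y) (hna : pvD a = false) :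
    pvRstrip (x ++ y) = x ++ pvRstrip y ∧ pvRstrip y ≠ [] := by
  have hnil : List.dropWhile pvD y.reverse ≠ [] := by
    rw [Ne, List.dropWhile_eq_nil_iff]
    intro hall
    have := hall a (by simpa using ha)
    simp [hna] at this
  constructor
  · rw [pvRstrip, List.reverse_append, List.dropWhile_append,
      if_neg (by simpa [List.isEmpty_iff] using hnil)]
    simp [pvRstrip]
  · simpa [pvRstrip] using hnil

theorem pv_go_append (w r : List Char) (h : ∀ x ∈ w, pvD x = false) :
    pvGo false (w ++ r) = w ++ pvGo false r := by
  induction w with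
  | nil => simp
  | cons a w ih =>
    have ha : pvD a = false := h a (by simp)
    rw [List.cons_append, pvGo, if_neg (by simp), show (a == '-') = false from ha,
      ih (by intro x hx; exact h x (by simp [hx]))]
    simp

theorem pv_tok_dropWhile (cs : List Char) : pvTok (cs.dropWhile pvD) = pvTok cs := by
  induction cs with
  | nil => rfl
  | cons c cs ih =>
    by_cases h : c = '-'
    · subst h
      rw [List.dropWhile_cons, if_pos (by simp [pvD]), ih, pvTok, if_pos rfl]
    · rw [List.dropWhile_cons, if_neg (by simp [pvD, h])]

theorem pv_main_aux (n : Nat) : ∀ t : List Char, t.length ≤ n →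
    (∀ d, t.head? = some d → pvD d = false) →
    pvRstrip (pvGo false t) = List.intercalate ['-'] (pvTok t) := by
  induction n with
  | zero =>
    intro t ht _
    have ht0 : t = [] := by cases t with
      | nil => rfl
      | cons a l => simp at ht
    subst ht0
    simp [pvGo, pvTok, pvRstrip, List.intercalate]
  | succ n ih =>
    intro t ht hh
    cases t with
    | nil => simp [pvGo, pvTok, pvRstrip, List.intercalate]
    | cons c cs =>
      have hc : pvD c = false := hh c rfl
      have hcne : ¬ c = '-' := by simpa [pvD] using hc
      set w := cs.takeWhile pvND with hw
      set r := cs.dropWhile pvND with hr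
      have hwall : ∀ x ∈ w, pvD x = false := by
        intro x hx
        have := List.mem_takeWhile_imp hx
        simpa [pvND, pvD] using this
      have hsplit : w ++ r = cs := List.takeWhile_append_dropWhile
      have hgo : pvGo false (c :: cs) = (c :: w) ++ pvGo false r := by
        rw [pvGo, if_neg (by simp [hcne]), show (c == '-') = false from hc, ← hsplit,
          pv_go_append _ _ hwall]
        simp
      have htok : pvTok (c :: cs) = (c :: w) :: pvTok r := by
        rw [pvTok, if_neg hcne]
      have hcwall : ∀ x ∈ c :: w, pvD x = false := by
        intro x hx
        rcases List.mem_cons.1 hx with h | h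
        · subst h; exact hc
        · exact hwall x h
      rcases hrr : r with _ | ⟨d, r₂⟩
      · rw [hgo, hrr, htok, hrr]
        simp only [pvGo, List.append_nil, pvTok, List.intercalate]
        rw [pv_rstrip_of_all hcwall]
        simp
      · have hd : d = '-' := by
          have hne := List.head_dropWhile_not (p := pvND) (l := cs)
          have h2 := hne (by rw [← hr, hrr]; simp)
          simp only [← hr, hrr, List.head_cons] at h2
          simpa [pvND] using h2
        subst hd
        have hgor : pvGo false r = '-' :: pvGo false (r₂.dropWhile pvD) := by
          rw [hrr, pvGo, if_neg (by simp), show ('-' == '-') = true from rfl, pv_go_true]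
        set u := r₂.dropWhile pvD with hu
        have hhu : ∀ d, u.head? = some d → pvD d = false := pv_head_dropWhile r₂
        have htoku : pvTok r = pvTok u := by
          rw [hrr, pvTok, if_pos rfl, hu, pv_tok_dropWhile]
        have hlen : u.length ≤ n := by
          have h1 : u.length ≤ r₂.length := List.length_dropWhile_le _ _
          have h2 : r.length ≤ cs.length := hr ▸ List.length_dropWhile_le _ _
          have h3 : r.length = r₂.length + 1 := by rw [hrr]; simp
          have h4 : (c :: cs).length = cs.length + 1 := by simp
          omega
        rcases huu : u with _ | ⟨e, u₂⟩
        · rw [hgo, hgor, huu]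
          simp only [pvGo]
          rw [pv_rstrip_append_dash, pv_rstrip_of_all hcwall, htok, htoku, huu]
          simp [pvTok, List.intercalate]
        · have he : pvD e = false := by
            apply hhu; rw [huu]; simp
          have hmem : e ∈ pvGo false u := by
            rw [huu, pvGo, if_neg (by simp)]
            simp
          have happ := pv_rstrip_append ((c :: w) ++ ['-']) (pvGo false u) e hmem he
          have hIH := ih u hlen hhu
          have htoku_ne : pvTok u ≠ [] := by
            rw [huu, pvTok, if_neg (by simpa [pvD] using he)]
            simp
          rw [hgo, hgor, show (c :: w) ++ '-' :: pvGo false u = ((c :: w) ++ ['-']) ++ pvGo false u by simp]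
          rw [happ.1, hIH, htok, htoku]
          rcases htl : pvTok u with _ | ⟨t1, ts⟩
          · exact absurd htl htoku_ne
          · simp [List.intercalate]

theorem pv_foldl_collapse (cs : List Char) (acc : List Char) :
    cs.foldl (fun safe ch =>
      if ch = '-' ∧ safe ≠ [] ∧ safe.getLast? = some '-' then safe
      else safe ++ [ch]) acc = acc ++ pvGo (acc.getLast? == some '-') cs := by
  induction cs generalizing acc with
  | nil => simp [pvGo]
  | cons c cs ih =>
    simp only [List.foldl_cons]
    by_cases h : c = '-' ∧ acc ≠ [] ∧ acc.getLast? = some '-'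
    · rw [if_pos h, ih]
      have : (acc.getLast? == some '-') = true := by simp [h.2.2]
      rw [this, pvGo, if_pos ⟨h.1, rfl⟩]
    · rw [if_neg h, ih]
      have hl : (acc ++ [c]).getLast? = some c := by simp
      rw [hl]
      by_cases hb : (acc.getLast? == some '-') = true
      · -- then ¬(c = '-') since h fails; acc could be [] though: getLast? = some means acc ≠ []
        have hacc : acc ≠ [] := by
          intro he; subst he; simp at hb
        have hlast : acc.getLast? = some '-' := by simpa using hb
        have hc : c ≠ '-' := fun hc => h ⟨hc, hacc, hlast⟩
        rw [hb, pvGo]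
        rw [if_neg (by simp [hc])]
        simp
      · rw [Bool.not_eq_true] at hb
        rw [hb, pvGo, if_neg (by simp)]
        simp

def pvRest (cs : List Char) : List (List Char) :=
  match cs.dropWhile pvND with
  | [] => []
  | _ :: r => List.splitOn '-' r

theorem pv_splitOn_eq (cs : List Char) :
    List.splitOn '-' cs = cs.takeWhile pvND :: pvRest cs := by
  induction cs with
  | nil => simp [List.splitOn, pvRest]
  | cons c cs ih =>
    by_cases h : c = '-'
    · subst h
      simp [List.splitOn, List.splitOnP_cons, pvRest, pvND]
    · rw [show List.splitOn '-' (c :: cs) = List.modifyHead (List.cons c) (List.splitOn '-' cs) by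
        simp [List.splitOn, List.splitOnP_cons, h]]
      rw [ih]
      have hnd : pvND c = true := by simp [pvND, h]
      simp [pvRest, hnd]

theorem pv_splitOn_filter (cs : List Char) :
    (List.splitOn '-' cs).filter (fun t => t ≠ []) = pvTok cs := by
  induction cs using pvTok.induct with
  | case1 => simp [List.splitOn, pvTok]
  | case2 cs ih =>
    have h2 : List.splitOn '-' ('-' :: cs) = [] :: List.splitOn '-' cs := by
      simp [List.splitOn, List.splitOnP_cons]
    rw [h2, pvTok]
    simp only [List.filter_cons]
    rw [if_neg (by simp)]
    simpa using ih
  | case3 c cs h ih =>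
    have hnd : pvND c = true := by simp [pvND, h]
    have htw : (c :: cs).takeWhile pvND = c :: cs.takeWhile pvND := by
      rw [List.takeWhile_cons, if_pos hnd]
    rw [pv_splitOn_eq (c :: cs), pvTok, if_neg h, htw]
    simp only [List.filter_cons]
    rw [if_pos (by simp)]
    congr 1
    have hrest : pvRest (c :: cs) = pvRest cs := by
      unfold pvRest
      rw [List.dropWhile_cons, if_pos hnd]
    rw [hrest]
    rcases hd : cs.dropWhile pvND with _ | ⟨d, r⟩
    · simp [pvRest, hd, pvTok]
    · have hdh : d = '-' := by
        have := List.head_dropWhile_not (p := pvND) (l := cs)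
        rw [hd] at this
        have h2 := this (by simp)
        simp only [List.head_cons] at h2
        simpa [pvND] using h2
      subst hdh
      have h3 : pvRest cs = List.splitOn '-' r := by unfold pvRest; rw [hd]
      have h4 : List.splitOn '-' ('-' :: r) = [] :: List.splitOn '-' r := by
        simp [List.splitOn, List.splitOnP_cons]
      have h5 : pvTok ('-' :: r) = pvTok r := by rw [pvTok, if_pos rfl]
      rw [hd, h4, h5] at ih
      rw [h3, h5]
      simpa using ih

theorem pv_cleaned_eq (cs : List Char) :
    cs.foldl (fun acc ch =>
      if PySem.Chars.isalnum ch then acc ++ [ch]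
      else if ch = '-' ∨ ch = '_' ∨ PySem.Chars.isspace ch then acc ++ ['-']
      else acc) [] =
    cs.flatMap (fun ch =>
      if PySem.Chars.isalnum ch then [ch]
      else if ch = '-' ∨ ch = '_' ∨ PySem.Chars.isspace ch then ['-']
      else []) := by
  have hf : (fun (acc : List Char) ch =>
      if PySem.Chars.isalnum ch then acc ++ [ch]
      else if ch = '-' ∨ ch = '_' ∨ PySem.Chars.isspace ch then acc ++ ['-']
      else acc) = (fun acc ch => acc ++
        (if PySem.Chars.isalnum ch then [ch]
         else if ch = '-' ∨ ch = '_' ∨ PySem.Chars.isspace ch then ['-']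
         else [])) := by
    funext acc ch
    split_ifs <;> simp
  rw [hf]
  simpa using PySem.List.foldl_append_eq_flatMap _ cs []

theorem pv_result_eq (cs : List Char) :
    PySem.Chars.stripChars
      (cs.foldl (fun safe ch =>
        if ch = '-' ∧ safe ≠ [] ∧ safe.getLast? = some '-' then safe
        else safe ++ [ch]) []) ['-'] =
    PySem.Chars.join ['-'] ((List.splitOn '-' cs).filter (fun t => t ≠ [])) := by
  rw [pv_foldl_collapse cs []]
  simp only [List.getLast?_nil, List.nil_append]
  rw [show ((none : Option Char) == some '-') = false from rfl]
  rw [pv_stripChars_eq, pv_lstrip_go]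
  have hhead := pv_head_dropWhile cs
  rw [pv_main_aux (cs.dropWhile pvD).length _ le_rfl hhead, pv_tok_dropWhile,
    pv_splitOn_filter]
  rfl

-- ===== VERDICT (by name: the statement is the Claim_ definition above) =====
theorem sanitize_channel_name_spec : Claim_equal_sanitize_channel_name := by
  intro name _
  unfold Spec_sanitize_channel_name sanitize_channel_name sanitize_channel_name_alt
  simp only []
  rw [pv_cleaned_eq, pv_result_eq]
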